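-- pv_equiv track=rewrite | github.com/sachduce/Competitive-Coding | CodeChef/March/Long Challenge/LAZER.py | processPoints
-- ===== SOURCE A (Python) =====
-- def processPoints(arr, n):
--     curv = []
--     for i in range(2, n):
--         if(arr[i-1] > arr[i-2] and arr[i] < arr[i-1]):
--             curv.append(i-1)
--         elif(arr[i-1] < arr[i-2] and arr[i] > arr[i-1]):
--             curv.append(i - 1)
--         elif(arr[i-1] == arr[i-2] or arr[i] == arr[i-1]):
--             curv.append(i - 1)
--     curv.append(n-1)
--     start = 0
--     j = 0
--     curvDict = {}
--     while(j < n and start < len(curv)):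
--         if(j < curv[start]):
--             curvDict[j] = curv[start]
--             j +=1
--         else:
--             start +=1
--     curvDict[n-1] = n-1
--     return curvDict
-- ===== SOURCE B (Python) =====
-- def processPoints(arr, n):
--     # single backward pass: keep the nearest "curve" boundary strictly to the right
--     pairs = []
--     b = n - 1
--     for j in range(n - 2, -1, -1):
--         if j < n - 2 and not (arr[j] < arr[j+1] < arr[j+2] or arr[j] > arr[j+1] > arr[j+2]):
--             b = j + 1
--         pairs.append((j, b))
--     pairs.reverse()
--     pairs.append((n - 1, n - 1))
--     return dict(pairs)
-- ===== Notes on version B (the rewrite author's own statement) =====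
-- stated objective: alternative
-- what changed: A builds an explicit list of boundary indices and then merges it with positions by a two-pointer while-loop; B never materialises that list: a single backward scan carries the nearest boundary strictly to the right (recomputed from the monotonicity predicate on the fly) and emits the pairs, which are reversed into the dict.
import Mathlib
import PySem

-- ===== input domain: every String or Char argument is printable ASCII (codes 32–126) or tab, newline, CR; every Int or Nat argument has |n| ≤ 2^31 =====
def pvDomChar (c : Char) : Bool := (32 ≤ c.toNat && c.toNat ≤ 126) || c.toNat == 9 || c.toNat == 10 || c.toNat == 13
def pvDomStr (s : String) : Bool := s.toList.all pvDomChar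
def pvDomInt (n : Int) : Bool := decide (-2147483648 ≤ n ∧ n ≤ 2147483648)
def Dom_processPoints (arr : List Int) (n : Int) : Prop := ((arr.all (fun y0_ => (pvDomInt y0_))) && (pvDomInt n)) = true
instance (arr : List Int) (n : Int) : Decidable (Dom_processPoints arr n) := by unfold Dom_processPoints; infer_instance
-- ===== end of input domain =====

-- B replaces A's boundary-index list plus two-pointer merge by a single backward scan
-- that carries the nearest boundary to the right (objective: alternative, same cost).

-- ===== PORT A =====
-- the 3-branch `if/elif/elif` test of A's first loop (arr[...] via pyGetD, exact under Pre_)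
def pvCondA (arr : List Int) (i : Int) : Bool :=
  if PySem.List.pyGetD arr (i-1) 0 > PySem.List.pyGetD arr (i-2) 0 ∧ PySem.List.pyGetD arr i 0 < PySem.List.pyGetD arr (i-1) 0 then true
  else if PySem.List.pyGetD arr (i-1) 0 < PySem.List.pyGetD arr (i-2) 0 ∧ PySem.List.pyGetD arr i 0 > PySem.List.pyGetD arr (i-1) 0 then true
  else if PySem.List.pyGetD arr (i-1) 0 = PySem.List.pyGetD arr (i-2) 0 ∨ PySem.List.pyGetD arr i 0 = PySem.List.pyGetD arr (i-1) 0 then true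
  else false

-- A's while-loop; `start` is a Nat that only grows, so `curv.getD start 0` = Python's curv[start]
-- (the guard start < len(curv) makes the access exact)
def pvMergeA (curv : List Int) (n : Int) (j : Int) (start : Nat) (d : PySem.Dict Int Int) : PySem.Dict Int Int :=
  if h : j < n ∧ start < curv.length then
    if j < curv.getD start 0 then
      pvMergeA curv n (j+1) start (d.insert j (curv.getD start 0))
    else
      pvMergeA curv n j (start+1) d
  else d
termination_by (n - j).toNat + (curv.length - start)
decreasing_by all_goals omega

def processPoints (arr : List Int) (n : Int) : List (Int × Int) :=
  let curv := (PySem.List.pyRange 2 n 1).foldl (fun c i => if pvCondA arr i then c ++ [i-1] else c) []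
  let curv2 := curv ++ [n-1]
  let d := pvMergeA curv2 n 0 0 PySem.Dict.empty
  (d.insert (n-1) (n-1)).items

-- ===== PORT B =====
-- `arr[j] < arr[j+1] < arr[j+2] or arr[j] > arr[j+1] > arr[j+2]`
def pvMono (arr : List Int) (j : Int) : Bool :=
  (decide (PySem.List.pyGetD arr j 0 < PySem.List.pyGetD arr (j+1) 0 ∧ PySem.List.pyGetD arr (j+1) 0 < PySem.List.pyGetD arr (j+2) 0))
  || (decide (PySem.List.pyGetD arr j 0 > PySem.List.pyGetD arr (j+1) 0 ∧ PySem.List.pyGetD arr (j+1) 0 > PySem.List.pyGetD arr (j+2) 0))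

-- one iteration of B's backward loop: state = (b, pairs)
def pvStepB (arr : List Int) (n : Int) (s : Int × List (Int × Int)) (j : Int) : Int × List (Int × Int) :=
  let b := if j < n - 2 ∧ ¬ (pvMono arr j = true) then j + 1 else s.1
  (b, s.2 ++ [(j, b)])

def processPoints_alt (arr : List Int) (n : Int) : List (Int × Int) :=
  let s := (PySem.List.pyRange (n-2) (-1) (-1)).foldl (pvStepB arr n) (n-1, [])
  let pairs := s.2.reverse ++ [(n-1, n-1)]
  (PySem.Dict.ofList pairs).items

-- ===== PRECONDITION & SPEC =====
-- Python A raises IndexError iff the first loop runs (n ≥ 3) and some arr[i], i < n, is out of range.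
def Pre_processPoints (arr : List Int) (n : Int) : Prop := 3 ≤ n → n ≤ (arr.length : Int)
instance (arr : List Int) (n : Int) : Decidable (Pre_processPoints arr n) := by unfold Pre_processPoints; infer_instance
def pvWitness_processPoints : List Int × Int := ([1, 2, 1, 1], 4)

def Spec_processPoints (arr : List Int) (n : Int) (out : List (Int × Int)) : Prop := out = processPoints_alt arr n
instance (arr : List Int) (n : Int) (out : List (Int × Int)) : Decidable (Spec_processPoints arr n out) := by unfold Spec_processPoints; infer_instance

-- ===== CLAIM (what is proved, stated in full; the proofs are below) =====
def Claim_equal_processPoints : Prop := ∀ (arr : List Int) (n : Int), Dom_processPoints arr n → Pre_processPoints arr n → Spec_processPoints arr n (processPoints arr n)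

-- ===== LEMMAS AND PROOFS =====

-- boundary predicate at index k (uses cells k-1, k, k+1); A tests it at k = i-1, B at k = j+1
def pvPb (arr : List Int) (k : Int) : Bool := !(pvMono arr (k-1))

-- the nearest boundary strictly greater than j (n-1 is always a boundary)
def pvNext (arr : List Int) (n : Int) (j : Int) : Int :=
  if h : n - 1 ≤ j + 1 then n - 1
  else if pvPb arr (j+1) then j + 1
  else pvNext arr n (j+1)
termination_by (n - 1 - j).toNat
decreasing_by omega

-- pure rendition of A's while-loop on the suffix curv.drop start
def pvMergePure (n : Int) : List Int → Int → List (Int × Int)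
  | [], _ => []
  | c :: rest, j =>
    if h : j < n then
      if j < c then (j, c) :: pvMergePure n (c :: rest) (j+1)
      else pvMergePure n rest j
    else []
termination_by l j => (n - j).toNat + l.length
decreasing_by
  · simp only [List.length_cons]; omega
  · simp only [List.length_cons]; omega

lemma pvCondA_eq (arr : List Int) (i : Int) : pvCondA arr i = pvPb arr (i-1) := by
  have e1 : i - 1 - 1 = i - 2 := by ring
  have e2 : i - 2 + 1 = i - 1 := by ring
  have e3 : i - 2 + 2 = i := by ring
  unfold pvCondA pvPb pvMono
  rw [e1, e2, e3]
  split_ifs with h1 h2 h3 <;> simp_all <;> omega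

lemma pvNext_eq (arr : List Int) (n : Int) (c : Int) :
    ∀ (j : Int), j < c → c ≤ n - 1 → (c = n - 1 ∨ pvPb arr c = true) →
    (∀ t : Int, j < t → t < c → pvPb arr t = false) → pvNext arr n j = c := by
  have H : ∀ (K : Nat) (j : Int), (c - j).toNat ≤ K → j < c → c ≤ n - 1 →
      (c = n - 1 ∨ pvPb arr c = true) →
      (∀ t : Int, j < t → t < c → pvPb arr t = false) → pvNext arr n j = c := by
    intro K
    induction K with
    | zero => intro j hK h1 h2 hP hmin; omega
    | succ K ih =>
      intro j hK h1 h2 hP hmin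
      rw [pvNext.eq_def]
      split_ifs with hA hB
      · omega
      · by_contra hne
        have hlt : j + 1 < c := by omega
        have := hmin (j+1) (by omega) hlt
        simp_all
      · have hlt : j + 1 < c := by
          rcases hP with hP | hP
          · omega
          · by_contra hc
            have : j + 1 = c := by omega
            rw [this] at hB; simp_all
        exact ih (j+1) (by omega) hlt h2 hP (fun t ht1 ht2 => hmin t (by omega) ht2)
  exact fun j => H (c - j).toNat j (le_refl _)

lemma filter_range_cons (p : Int → Bool) :
    ∀ (K : Nat) (a b c : Int) (rest : List Int), (b - a).toNat ≤ K →
    (PySem.List.pyRange a b 1).filter p = c :: rest →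
    a ≤ c ∧ c < b ∧ p c = true ∧ (∀ t, a ≤ t → t < c → p t = false) ∧
      rest = (PySem.List.pyRange (c+1) b 1).filter p := by
  intro K
  induction K with
  | zero =>
    intro a b c rest hK h
    rw [PySem.List.pyRange_one_eq_nil (by omega)] at h
    simp at h
  | succ K ih =>
    intro a b c rest hK h
    by_cases hab : b ≤ a
    · rw [PySem.List.pyRange_one_eq_nil hab] at h; simp at h
    · rw [PySem.List.pyRange_one_cons (by omega)] at h
      rw [List.filter_cons] at h
      by_cases hpa : p a = true
      · simp only [hpa, if_true, List.cons.injEq] at h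
        obtain ⟨hc, hrest⟩ := h
        subst hc
        exact ⟨le_refl _, by omega, hpa, fun t ht1 ht2 => by omega, hrest.symm⟩
      · simp only [hpa] at h
        obtain ⟨k1, k2, k3, k4, k5⟩ := ih (a+1) b c rest (by omega) h
        refine ⟨by omega, k2, k3, ?_, k5⟩
        intro t ht1 ht2
        rcases eq_or_lt_of_le ht1 with he | hl
        · rw [← he]; simpa using hpa
        · exact k4 t (by omega) ht2

lemma filter_range_nil (p : Int → Bool) (a b : Int)
    (h : (PySem.List.pyRange a b 1).filter p = []) :
    ∀ t : Int, a ≤ t → t < b → p t = false := by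
  rw [List.filter_eq_nil_iff] at h
  intro t h1 h2
  have := h t (PySem.List.mem_pyRange_one.mpr ⟨h1, h2⟩)
  simpa using this

lemma pvMergePure_nil (n : Int) (l : List Int) (j : Int) (h : ¬ j < n) :
    pvMergePure n l j = [] := by
  cases l with
  | nil => rw [pvMergePure.eq_def]
  | cons c rest => rw [pvMergePure.eq_def]; simp [h]

lemma pvMergePure_nil_list (n : Int) (j : Int) : pvMergePure n [] j = [] := by
  rw [pvMergePure.eq_def]

lemma pvMergePure_cons_lt (n c : Int) (rest : List Int) (j : Int) (hj : j < n) (hc : j < c) :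
    pvMergePure n (c :: rest) j = (j, c) :: pvMergePure n (c :: rest) (j+1) := by
  conv_lhs => rw [pvMergePure.eq_def]
  simp only []
  rw [dif_pos hj, if_pos hc]

lemma pvMergePure_cons_ge (n c : Int) (rest : List Int) (j : Int) (hj : j < n) (hc : ¬ j < c) :
    pvMergePure n (c :: rest) j = pvMergePure n rest j := by
  conv_lhs => rw [pvMergePure.eq_def]
  simp only []
  rw [dif_pos hj, if_neg hc]

lemma pvMergePure_spec (arr : List Int) (n : Int) :
    ∀ (K : Nat) (m j : Int),
    (n - 1 - j).toNat + ((PySem.List.pyRange m (n-1) 1).filter (pvPb arr)).length ≤ K →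
    m ≤ j + 1 → j ≤ n - 1 →
    pvMergePure n (((PySem.List.pyRange m (n-1) 1).filter (pvPb arr)) ++ [n-1]) j
      = (PySem.List.pyRange j (n-1) 1).map (fun t => (t, pvNext arr n t)) := by
  intro K
  induction K with
  | zero =>
    intro m j hK hm hj
    have hj' : j = n - 1 := by omega
    have hf : ((PySem.List.pyRange m (n-1) 1).filter (pvPb arr)).length = 0 := by omega
    rw [List.length_eq_zero_iff] at hf
    rw [hf]
    subst hj'
    simp only [List.nil_append]
    rw [pvMergePure.eq_def]
    simp only []
    rw [dif_pos (by omega : n - 1 < n), if_neg (by omega : ¬ (n - 1 < n - 1))]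
    rw [pvMergePure_nil_list]
    rw [PySem.List.pyRange_one_eq_nil (le_refl _)]
    rfl
  | succ K ih =>
    intro m j hK hm hj
    rcases hf : (PySem.List.pyRange m (n-1) 1).filter (pvPb arr) with _ | ⟨c, rest⟩
    · have hall := filter_range_nil (pvPb arr) m (n-1) hf
      simp only [List.nil_append]
      by_cases hjc : j < n - 1
      · rw [pvMergePure.eq_def]
        simp only []
        rw [dif_pos (by omega : j < n), if_pos hjc]
        have hnext : pvNext arr n j = n - 1 :=
          pvNext_eq arr n (n-1) j hjc (le_refl _) (Or.inl rfl)
            (fun t ht1 ht2 => hall t (by omega) ht2)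
        have hfilt2 : ((PySem.List.pyRange (j+1) (n-1) 1).filter (pvPb arr)) = [] := by
          rw [List.filter_eq_nil_iff]
          intro x hx
          rw [PySem.List.mem_pyRange_one] at hx
          simp [hall x (by omega) hx.2]
        rw [hf] at hK
        have hrec := ih (j+1) (j+1) (by rw [hfilt2]; simp at hK ⊢; omega) (by omega) (by omega)
        rw [hfilt2] at hrec
        simp only [List.nil_append] at hrec
        rw [hrec]
        rw [PySem.List.pyRange_one_cons (by omega : j < n - 1)]
        simp [hnext]
      · have hje : j = n - 1 := by omega
        subst hje
        rw [pvMergePure.eq_def]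
        simp only []
        rw [dif_pos (by omega : n - 1 < n), if_neg (by omega : ¬ (n - 1 < n - 1))]
        rw [pvMergePure_nil_list]
        rw [PySem.List.pyRange_one_eq_nil (le_refl _)]
        rfl
    · obtain ⟨k1, k2, k3, k4, k5⟩ :=
        filter_range_cons (pvPb arr) ((n - 1) - m).toNat m (n-1) c rest (le_refl _) hf
      rw [hf] at hK
      simp only [List.length_cons] at hK
      by_cases hjc : j < c
      · simp only [List.cons_append]
        rw [pvMergePure.eq_def]
        simp only []
        rw [dif_pos (by omega : j < n), if_pos hjc]
        have hnext : pvNext arr n j = c :=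
          pvNext_eq arr n c j hjc (by omega) (Or.inr k3)
            (fun t ht1 ht2 => k4 t (by omega) ht2)
        rw [← List.cons_append, ← hf]
        rw [ih m (j+1) (by rw [hf]; simp only [List.length_cons]; omega) (by omega) (by omega)]
        rw [PySem.List.pyRange_one_cons (by omega : j < n - 1)]
        simp [hnext]
      · simp only [List.cons_append]
        rw [pvMergePure.eq_def]
        simp only []
        rw [dif_pos (by omega : j < n), if_neg hjc]
        rw [k5]
        have hlen : ((PySem.List.pyRange (c+1) (n-1) 1).filter (pvPb arr)).length = rest.length := by
          rw [← k5]
        rw [ih (c+1) j (by rw [hlen]; omega) (by omega) hj]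

lemma pvMergeA_items (n : Int) :
    ∀ (K : Nat) (curv : List Int) (j : Int) (start : Nat) (d : PySem.Dict Int Int),
    (n - j).toNat + (curv.length - start) ≤ K →
    (∀ k ∈ d.keys, k < j) →
    (pvMergeA curv n j start d).items = d.items ++ pvMergePure n (curv.drop start) j := by
  intro K
  induction K with
  | zero =>
    intro curv j start d hK hkeys
    rw [pvMergeA.eq_def]
    rw [dif_neg (by omega)]
    rw [List.drop_eq_nil_of_le (by omega), pvMergePure_nil_list, List.append_nil]
  | succ K ih =>
    intro curv j start d hK hkeys
    rw [pvMergeA.eq_def]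
    by_cases hg : j < n ∧ start < curv.length
    · rw [dif_pos hg]
      have hdrop : curv.drop start = curv[start] :: curv.drop (start+1) :=
        List.drop_eq_getElem_cons hg.2
      have hgetD : curv.getD start 0 = curv[start] := List.getD_eq_getElem curv 0 hg.2
      by_cases hjc : j < curv.getD start 0
      · rw [if_pos hjc]
        have hcont : d.contains j = false := by
          rw [PySem.Dict.contains_eq_decide_mem_keys]
          simp only [decide_eq_false_iff_not]
          intro hmem; exact absurd (hkeys j hmem) (lt_irrefl j)
        have hkeys' : ∀ k ∈ (d.insert j (curv.getD start 0)).keys, k < j + 1 := by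
          rw [PySem.Dict.keys_insert_of_not_contains d _ hcont]
          intro k hk
          rcases List.mem_append.mp hk with hh | hh
          · exact lt_trans (hkeys k hh) (by omega)
          · simp at hh; omega
        rw [ih curv (j+1) start (d.insert j (curv.getD start 0)) (by omega) hkeys']
        rw [PySem.Dict.items_insert_of_not_contains d _ hcont]
        rw [hdrop]
        rw [pvMergePure_cons_lt n curv[start] (curv.drop (start+1)) j hg.1 (hgetD ▸ hjc)]
        rw [hgetD]
        simp [List.append_assoc]
      · rw [if_neg hjc]
        rw [ih curv j (start+1) d (by omega) hkeys]
        rw [hdrop]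
        rw [pvMergePure_cons_ge n curv[start] (curv.drop (start+1)) j hg.1 (hgetD ▸ hjc)]
    · rw [dif_neg hg]
      have hnil : pvMergePure n (curv.drop start) j = [] := by
        rcases not_and_or.mp hg with hh | hh
        · exact pvMergePure_nil n _ j hh
        · rw [List.drop_eq_nil_of_le (by omega), pvMergePure_nil_list]
      rw [hnil, List.append_nil]

lemma pvFoldB (arr : List Int) (n : Int) :
    ∀ (K : Nat) (m : Int) (acc : List (Int × Int)), (m + 1).toNat ≤ K → -1 ≤ m → m ≤ n - 2 →
    (PySem.List.pyRange m (-1) (-1)).foldl (pvStepB arr n) (pvNext arr n (m+1), acc)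
      = (pvNext arr n 0, acc ++ (PySem.List.pyRange m (-1) (-1)).map (fun j => (j, pvNext arr n j))) := by
  intro K
  induction K with
  | zero =>
    intro m acc hK h1 h2
    have hm : m = -1 := by omega
    subst hm
    rw [PySem.List.pyRange_neg_one_eq_nil (le_refl _)]
    norm_num
  | succ K ih =>
    intro m acc hK h1 h2
    by_cases hm : m = -1
    · subst hm
      rw [PySem.List.pyRange_neg_one_eq_nil (le_refl _)]
      norm_num
    · rw [PySem.List.pyRange_neg_one_cons (by omega : (-1:Int) < m)]
      simp only [List.foldl_cons, List.map_cons]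
      have hstep : pvStepB arr n (pvNext arr n (m+1), acc) m = (pvNext arr n m, acc ++ [(m, pvNext arr n m)]) := by
        have hb : (if m < n - 2 ∧ ¬ (pvMono arr m = true) then m + 1 else pvNext arr n (m+1)) = pvNext arr n m := by
          by_cases hc : n - 1 ≤ m + 1
          · rw [if_neg (by omega : ¬ (m < n - 2 ∧ ¬ (pvMono arr m = true)))]
            conv_rhs => rw [pvNext.eq_def]
            rw [dif_pos hc]
            rw [pvNext.eq_def]
            rw [dif_pos (by omega : n - 1 ≤ m + 1 + 1)]
          · conv_rhs => rw [pvNext.eq_def]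
            rw [dif_neg hc]
            have he : m + 1 - 1 = m := by ring
            unfold pvPb
            rw [he]
            by_cases hp : pvMono arr m = true
            · rw [if_neg (by simp [hp]), if_neg (by simp [hp])]
            · rw [if_pos (show m < n - 2 ∧ ¬ (pvMono arr m = true) from ⟨by omega, hp⟩), if_pos (by simp [hp])]
          
        unfold pvStepB
        simp only []
        rw [hb]
      rw [hstep]
      have hrw : m - 1 + 1 = m := by ring
      have hrec := ih (m-1) (acc ++ [(m, pvNext arr n m)]) (by omega) (by omega) (by omega)
      rw [hrw] at hrec
      rw [hrec]
      simp [List.append_assoc]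

lemma alt_eq (arr : List Int) (n : Int) :
    processPoints_alt arr n
      = (PySem.List.pyRange 0 (n-1) 1).map (fun j => (j, pvNext arr n j)) ++ [(n-1, n-1)] := by
  simp only [processPoints_alt]
  by_cases hn : 1 ≤ n
  · have h0 : pvNext arr n (n - 2 + 1) = n - 1 := by
      rw [pvNext.eq_def, dif_pos (by omega : n - 1 ≤ n - 2 + 1 + 1)]
    have hfold := pvFoldB arr n (n - 1).toNat (n - 2) [] (by omega) (by omega) (by omega)
    rw [h0] at hfold
    rw [hfold]
    simp only [List.nil_append]
    rw [PySem.List.pyRange_neg_one_eq_reverse]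
    have hr : (-1 : Int) + 1 = 0 := by norm_num
    have hr2 : n - 2 + 1 = n - 1 := by ring
    rw [hr, hr2]
    rw [List.map_reverse, List.reverse_reverse]
    simp only [PySem.Dict.ofList, PySem.Dict.update]
    rw [PySem.Dict.items_foldl_insert_fresh
      ((PySem.List.pyRange 0 (n-1) 1).map (fun j => (j, pvNext arr n j)) ++ [(n-1, n-1)])
      Prod.fst Prod.snd PySem.Dict.empty (by intro a _; simp) ?_]
    · simp [PySem.Dict.empty]
    · rw [List.map_append, List.map_map]
      have : (Prod.fst ∘ fun j => (j, pvNext arr n j)) = fun j => j := by funext j; rfl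
      rw [this]
      rw [List.nodup_append]
      refine ⟨by simpa using PySem.List.nodup_pyRange_one 0 (n-1), List.nodup_singleton _, ?_⟩
      intro x hx
      simp only [List.map_id'] at hx
      rw [PySem.List.mem_pyRange_one] at hx
      simp only [List.map_cons, List.map_nil, List.mem_singleton, forall_eq]
      omega
  · rw [PySem.List.pyRange_neg_one_eq_nil (by omega : n - 2 ≤ -1)]
    rw [PySem.List.pyRange_one_eq_nil (by omega : n - 1 ≤ 0)]
    simp only [List.foldl_nil, List.reverse_nil, List.nil_append, List.map_nil]
    simp only [PySem.Dict.ofList, PySem.Dict.update]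
    simp only [List.foldl_cons, List.foldl_nil]
    rw [PySem.Dict.items_insert_of_not_contains _ _ (by simp)]
    simp [PySem.Dict.empty]

lemma a_eq (arr : List Int) (n : Int) :
    processPoints arr n
      = (PySem.List.pyRange 0 (n-1) 1).map (fun j => (j, pvNext arr n j)) ++ [(n-1, n-1)] := by
  simp only [processPoints]
  rw [PySem.List.foldl_append_if (pvCondA arr) (fun i => i - 1)]
  simp only [List.nil_append]
  have hcurv : ((PySem.List.pyRange 2 n 1).filter (pvCondA arr)).map (fun i => i - 1)
      = (PySem.List.pyRange 1 (n-1) 1).filter (pvPb arr) := by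
    rw [PySem.List.pyRange_one 2 n, PySem.List.pyRange_one 1 (n-1)]
    have hlen : (n - 2).toNat = (n - 1 - 1).toNat := by omega
    rw [List.filter_map, List.filter_map, hlen]
    have hfun : ((fun i => i - 1) ∘ fun k : Nat => 2 + (k : Int)) = fun k : Nat => 1 + (k : Int) := by
      funext k
      show (2 : Int) + (k : Int) - 1 = 1 + (k : Int)
      ring
    have hp : (pvCondA arr ∘ fun k : Nat => 2 + (k : Int)) = (pvPb arr ∘ fun k : Nat => 1 + (k : Int)) := by
      funext k
      show pvCondA arr (2 + (k : Int)) = pvPb arr (1 + (k : Int))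
      rw [pvCondA_eq]
      congr 1
      ring
    rw [List.map_map, hfun, hp]
  rw [hcurv]
  have hkeys0 : ∀ k ∈ (PySem.Dict.empty : PySem.Dict Int Int).keys, k < (0 : Int) := by
    simp [PySem.Dict.keys, PySem.Dict.empty]
  have hitems := pvMergeA_items n
    (n.toNat + ((PySem.List.pyRange 1 (n-1) 1).filter (pvPb arr) ++ [n-1]).length)
    ((PySem.List.pyRange 1 (n-1) 1).filter (pvPb arr) ++ [n-1]) 0 0 PySem.Dict.empty
    (by omega) hkeys0
  simp only [List.drop_zero] at hitems
  have hpure : pvMergePure n ((PySem.List.pyRange 1 (n-1) 1).filter (pvPb arr) ++ [n-1]) 0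
      = (PySem.List.pyRange 0 (n-1) 1).map (fun t => (t, pvNext arr n t)) := by
    by_cases hn : 1 ≤ n
    · exact pvMergePure_spec arr n
        ((n - 1).toNat + ((PySem.List.pyRange 1 (n-1) 1).filter (pvPb arr)).length)
        1 0 (by omega) (by omega) (by omega)
    · rw [PySem.List.pyRange_one_eq_nil (by omega : n - 1 ≤ 1)]
      rw [PySem.List.pyRange_one_eq_nil (by omega : n - 1 ≤ 0)]
      simp only [List.filter_nil, List.nil_append, List.map_nil]
      exact pvMergePure_nil n _ 0 (by omega)
  rw [hpure] at hitems
  have hie : (PySem.Dict.empty : PySem.Dict Int Int).items = [] := rfl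
  rw [hie, List.nil_append] at hitems
  have hcont : (pvMergeA ((PySem.List.pyRange 1 (n-1) 1).filter (pvPb arr) ++ [n-1]) n 0 0
      PySem.Dict.empty).contains (n-1) = false := by
    rw [PySem.Dict.contains_eq_decide_mem_keys]
    simp only [decide_eq_false_iff_not]
    intro hmem
    simp only [PySem.Dict.keys] at hmem
    rw [hitems] at hmem
    obtain ⟨p, hp, hfst⟩ := List.mem_map.mp hmem
    obtain ⟨t, ht, rfl⟩ := List.mem_map.mp hp
    rw [PySem.List.mem_pyRange_one] at ht
    simp only at hfst
    omega
  rw [PySem.Dict.items_insert_of_not_contains _ _ hcont, hitems]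

-- ===== VERDICT (by name: the statement is the Claim_ definition above) =====
theorem processPoints_spec : Claim_equal_processPoints := by
  intro arr n _ _
  unfold Spec_processPoints
  rw [a_eq, alt_eq]
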